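-- pv_equiv track=rewrite | github.com/val-is/advent-of-code | 2023/day11.py | add_col
-- ===== SOURCE A (Python) =====
-- def get_max(mapping):
--     max_x = 0
--     max_y = 0
--     for coord in mapping:
--         max_x = max(max_x, coord[0])
--         max_y = max(max_y, coord[1])
--     return max_x, max_y
--
-- def add_col(mapping, col_idx):
--     max_x, max_y = get_max(mapping)
--     for x in range(col_idx, max_x+1)[::-1]:
--         for y in range(max_y+1):
--             mapping[x+1, y] = mapping[x, y]
--     for y in range(max_y+1):
--         mapping[col_idx, y] = False
--     return mapping
-- ===== SOURCE B (Python) =====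
-- def add_col(mapping, col_idx):
--     max_x = 0
--     max_y = 0
--     for (x, y) in mapping:
--         if x > max_x:
--             max_x = x
--         if y > max_y:
--             max_y = y
--     # snapshot the region to be shifted (dense read: missing cells raise KeyError here)
--     orig = {(x, y): mapping[x, y]
--             for x in range(col_idx, max_x + 1)
--             for y in range(max_y + 1)}
--     # single forward pass over the snapshot: no overwrite hazard, no reversed order
--     for (x, y), v in orig.items():
--         mapping[x + 1, y] = v
--     for y in range(max_y + 1):
--         mapping[col_idx, y] = False
--     return mapping
-- ===== Notes on version B (the rewrite author's own statement) =====
-- stated objective: alternative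
-- what changed: B snapshots the region to be moved into a buffer dict and writes it back in one forward pass over the buffer's items, instead of A's reversed-order nested loops that shift cells in place and rely on iteration order to avoid overwriting unread cells.
import Mathlib
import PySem

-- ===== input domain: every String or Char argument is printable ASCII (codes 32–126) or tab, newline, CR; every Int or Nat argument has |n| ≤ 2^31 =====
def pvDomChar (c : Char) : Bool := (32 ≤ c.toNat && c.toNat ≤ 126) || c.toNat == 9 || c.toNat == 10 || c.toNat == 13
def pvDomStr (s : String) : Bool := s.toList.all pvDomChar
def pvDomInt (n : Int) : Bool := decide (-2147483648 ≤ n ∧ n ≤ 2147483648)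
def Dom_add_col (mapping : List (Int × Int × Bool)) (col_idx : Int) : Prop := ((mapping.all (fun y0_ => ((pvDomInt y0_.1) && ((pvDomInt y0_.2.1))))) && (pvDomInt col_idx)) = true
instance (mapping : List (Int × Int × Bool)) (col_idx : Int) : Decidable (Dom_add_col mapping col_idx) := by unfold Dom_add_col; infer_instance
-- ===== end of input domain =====

-- B replaces A's reversed-order in-place shifting by a snapshot of the moved region followed by one
-- forward pass over the snapshot's items (objective: alternative decomposition, same cost).
-- Both Pythons mutate the caller's dict in place and return the same object; the equivalence proved
-- here is about the returned dict (as the association list of its items).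

-- Marshalling between the triple-list form of the Python dict argument and PySem.Dict
-- (Dict.ofList has Python's construction semantics: first position, last value on duplicates).
def pyDictOfTriples (mapping : List (Int × Int × Bool)) : PySem.Dict (Int × Int) Bool :=
  PySem.Dict.ofList (mapping.map (fun t => ((t.1, t.2.1), t.2.2)))

def pyTriplesOfDict (d : PySem.Dict (Int × Int) Bool) : List (Int × Int × Bool) :=
  d.items.map (fun p => (p.1.1, p.1.2, p.2))

-- ===== PORT A =====
-- get_max: iterating a Python dict yields its keys.
def get_max (d : PySem.Dict (Int × Int) Bool) : Int × Int :=
  d.keys.foldl (fun acc coord => (max acc.1 coord.1, max acc.2 coord.2)) (0, 0)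

-- range(col_idx, max_x+1)[::-1] is the reversed range (PySem.List.slice?_none_none_neg_one);
-- mapping[x, y] reads use getD false: Pre_add_col guarantees the key is present (else Python raises KeyError).
def add_col (mapping : List (Int × Int × Bool)) (col_idx : Int) : List (Int × Int × Bool) :=
  let d := pyDictOfTriples mapping
  let mxy := get_max d
  let d1 := ((PySem.List.pyRange col_idx (mxy.1 + 1) 1).reverse).foldl
    (fun e x => (PySem.List.pyRange 0 (mxy.2 + 1) 1).foldl
      (fun e y => e.insert (x + 1, y) (e.getD (x, y) false)) e) d
  let d2 := (PySem.List.pyRange 0 (mxy.2 + 1) 1).foldl (fun e y => e.insert (col_idx, y) false) d1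
  pyTriplesOfDict d2

-- ===== PORT B =====
-- B's max loop with explicit if-updates.
def get_bounds (d : PySem.Dict (Int × Int) Bool) : Int × Int :=
  d.keys.foldl (fun acc c =>
    (if c.1 > acc.1 then c.1 else acc.1, if c.2 > acc.2 then c.2 else acc.2)) (0, 0)

-- the snapshot dict comprehension 'orig': its keys (x, y) are pairwise distinct, so the dict's
-- items are literally this list of pairs, built here directly (reads use getD false under Pre_).
def snapshotRegion (d : PySem.Dict (Int × Int) Bool) (col_idx mx my : Int) :
    List ((Int × Int) × Bool) :=
  (PySem.List.pyRange col_idx (mx + 1) 1).flatMap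
    (fun x => (PySem.List.pyRange 0 (my + 1) 1).map
      (fun y => ((x, y), d.getD (x, y) false)))

def add_col_alt (mapping : List (Int × Int × Bool)) (col_idx : Int) : List (Int × Int × Bool) :=
  let d := pyDictOfTriples mapping
  let b := get_bounds d
  let orig := snapshotRegion d col_idx b.1 b.2
  let d1 := orig.foldl (fun e kv => e.insert (kv.1.1 + 1, kv.1.2) kv.2) d
  let d2 := (PySem.List.pyRange 0 (b.2 + 1) 1).foldl (fun e y => e.insert (col_idx, y) false) d1
  pyTriplesOfDict d2

-- ===== PRECONDITION & SPEC =====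
-- Pre_ excludes exactly the inputs on which Python A raises KeyError: some cell (x, y) of the dense
-- rectangle col_idx ≤ x ≤ max_x, 0 ≤ y ≤ max_y that A reads is missing from the dict.  Stated as a
-- count over the dict's keys (the distinct keys inside the rectangle number exactly its area), which
-- is equivalent to density and evaluates without enumerating the rectangle.
def Pre_add_col (mapping : List (Int × Int × Bool)) (col_idx : Int) : Prop :=
  ((pyDictOfTriples mapping).keys.filter
      (fun k => decide (col_idx ≤ k.1 ∧ k.1 ≤ (get_max (pyDictOfTriples mapping)).1 ∧
        0 ≤ k.2 ∧ k.2 ≤ (get_max (pyDictOfTriples mapping)).2))).length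
    = ((get_max (pyDictOfTriples mapping)).1 + 1 - col_idx).toNat *
      ((get_max (pyDictOfTriples mapping)).2 + 1).toNat
instance (mapping : List (Int × Int × Bool)) (col_idx : Int) : Decidable (Pre_add_col mapping col_idx) := by unfold Pre_add_col; infer_instance

def pvWitness_add_col : (List (Int × Int × Bool)) × Int := ([(0, 0, true)], 0)

def Spec_add_col (mapping : List (Int × Int × Bool)) (col_idx : Int) (out : List (Int × Int × Bool)) : Prop := out = add_col_alt mapping col_idx
instance (mapping : List (Int × Int × Bool)) (col_idx : Int) (out : List (Int × Int × Bool)) : Decidable (Spec_add_col mapping col_idx out) := by unfold Spec_add_col; infer_instance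

-- ===== CLAIM (what is proved, stated in full; the proofs are below) =====
def Claim_equal_add_col : Prop := ∀ (mapping : List (Int × Int × Bool)) (col_idx : Int), Dom_add_col mapping col_idx → Pre_add_col mapping col_idx → Spec_add_col mapping col_idx (add_col mapping col_idx)

-- ===== LEMMAS AND PROOFS =====

-- insert at an existing key commutes with insert at a different key (both keep list positions)
theorem pvInsertComm (e : PySem.Dict (Int × Int) Bool) (k1 k2 : Int × Int) (v1 v2 : Bool)
    (h1 : e.contains k1 = true) (hne : k1 ≠ k2) :
    (e.insert k1 v1).insert k2 v2 = (e.insert k2 v2).insert k1 v1 := by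
  have hne' : k2 ≠ k1 := Ne.symm hne
  apply PySem.Dict.ext
  by_cases h2 : e.contains k2 = true
  · rw [PySem.Dict.items_insert_of_contains _ v2
        (by rw [PySem.Dict.contains_insert]; simp [h2]),
      PySem.Dict.items_insert_of_contains _ v1 h1,
      PySem.Dict.items_insert_of_contains _ v1
        (by rw [PySem.Dict.contains_insert]; simp [h1]),
      PySem.Dict.items_insert_of_contains _ v2 h2,
      List.map_map, List.map_map]
    apply List.map_congr_left
    intro p _
    simp only [Function.comp_apply]
    by_cases e1 : p.1 = k1 <;> by_cases e2 : p.1 = k2 <;> simp_all [beq_iff_eq]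
  · have h2' : e.contains k2 = false := by simpa using h2
    rw [PySem.Dict.items_insert_of_not_contains _ v2
        (by rw [PySem.Dict.contains_insert]; simp [h2', hne']),
      PySem.Dict.items_insert_of_contains _ v1 h1,
      PySem.Dict.items_insert_of_contains _ v1
        (by rw [PySem.Dict.contains_insert]; simp [h1]),
      PySem.Dict.items_insert_of_not_contains _ v2 h2',
      List.map_append]
    simp [beq_iff_eq]
    exact fun h => absurd h hne'

-- one row of frozen writes: insert (x+1, y) := d0[(x,y)] for y running over ys
def rowOf (d0 : PySem.Dict (Int × Int) Bool) (x : Int) (ys : List Int)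
    (e : PySem.Dict (Int × Int) Bool) : PySem.Dict (Int × Int) Bool :=
  ys.foldl (fun e y => e.insert (x + 1, y) (d0.getD (x, y) false)) e

theorem getD_rowOf_of_ne (d0 : PySem.Dict (Int × Int) Bool) (x : Int) (ys : List Int)
    (e : PySem.Dict (Int × Int) Bool) (k : Int × Int) (hk : k.1 ≠ x + 1) :
    (rowOf d0 x ys e).getD k false = e.getD k false := by
  induction ys generalizing e with
  | nil => rfl
  | cons y t ih =>
    simp only [rowOf, List.foldl_cons] at *
    rw [ih, PySem.Dict.getD_insert_of_ne]
    intro h; apply hk; rw [h]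

theorem contains_rowOf_mono (d0 : PySem.Dict (Int × Int) Bool) (x : Int) (ys : List Int)
    (e : PySem.Dict (Int × Int) Bool) (k : Int × Int) (h : e.contains k = true) :
    (rowOf d0 x ys e).contains k = true := by
  induction ys generalizing e with
  | nil => exact h
  | cons y t ih =>
    simp only [rowOf, List.foldl_cons] at *
    exact ih _ (by rw [PySem.Dict.contains_insert]; simp [h])

-- A's inner loop (reads the current dict) equals the frozen row when the row is still unchanged
theorem rowCur_eq_rowOf (d0 : PySem.Dict (Int × Int) Bool) (x : Int) (ys : List Int)
    (e : PySem.Dict (Int × Int) Bool)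
    (h : ∀ y ∈ ys, e.getD (x, y) false = d0.getD (x, y) false) :
    ys.foldl (fun e y => e.insert (x + 1, y) (e.getD (x, y) false)) e = rowOf d0 x ys e := by
  induction ys generalizing e with
  | nil => rfl
  | cons y t ih =>
    simp only [rowOf, List.foldl_cons] at *
    rw [h y (by simp)]
    apply ih
    intro y' hy'
    rw [PySem.Dict.getD_insert_of_ne]
    · exact h y' (by simp [hy'])
    · intro hh
      have : x = x + 1 := congrArg Prod.fst hh
      omega

theorem insert_rowOf_comm (d0 : PySem.Dict (Int × Int) Bool) (x : Int) (ys : List Int)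
    (k : Int × Int) (v : Bool) (e : PySem.Dict (Int × Int) Bool)
    (hk : k.1 ≠ x + 1) (hck : e.contains k = true) :
    rowOf d0 x ys (e.insert k v) = (rowOf d0 x ys e).insert k v := by
  induction ys generalizing e with
  | nil => rfl
  | cons y t ih =>
    simp only [rowOf, List.foldl_cons] at *
    rw [pvInsertComm e k (x + 1, y) v _ hck (by intro h; apply hk; rw [h])]
    exact ih _ (by rw [PySem.Dict.contains_insert]; simp [hck])

-- two whole rows with different target columns commute, provided the lower row overwrites
theorem rowOf_comm (d0 : PySem.Dict (Int × Int) Bool) (x x' : Int) (ys ys' : List Int)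
    (e : PySem.Dict (Int × Int) Bool) (hne : x ≠ x')
    (hc : ∀ y ∈ ys, e.contains (x + 1, y) = true) :
    rowOf d0 x' ys' (rowOf d0 x ys e) = rowOf d0 x ys (rowOf d0 x' ys' e) := by
  induction ys generalizing e with
  | nil => rfl
  | cons y t ih =>
    have hpre : rowOf d0 x (y :: t) e = rowOf d0 x t (e.insert (x + 1, y) (d0.getD (x, y) false)) := rfl
    rw [hpre,
      ih _ (fun y' hy' => by
        rw [PySem.Dict.contains_insert]; simp [hc y' (by simp [hy'])]),
      insert_rowOf_comm d0 x' ys' _ _ e (by simpa using fun h => hne (by omega)) (hc y (by simp))]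
    rfl

theorem getD_foldl_rowOf (d0 : PySem.Dict (Int × Int) Bool) (ys : List Int) (t : List Int)
    (e : PySem.Dict (Int × Int) Bool) (k : Int × Int) (h : ∀ x'' ∈ t, k.1 ≠ x'' + 1) :
    (t.foldl (fun e x'' => rowOf d0 x'' ys e) e).getD k false = e.getD k false := by
  induction t generalizing e with
  | nil => rfl
  | cons x'' t' ih =>
    simp only [List.foldl_cons]
    rw [ih _ (fun a ha => h a (by simp [ha])), getD_rowOf_of_ne _ _ _ _ _ (h x'' (by simp))]

theorem foldl_rowOf_comm (d0 : PySem.Dict (Int × Int) Bool) (ys : List Int) (x : Int)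
    (t : List Int) (e : PySem.Dict (Int × Int) Bool)
    (hx : ∀ x'' ∈ t, x ≠ x'')
    (hc : ∀ y ∈ ys, e.contains (x + 1, y) = true) :
    rowOf d0 x ys (t.foldl (fun e x'' => rowOf d0 x'' ys e) e)
      = t.foldl (fun e x'' => rowOf d0 x'' ys e) (rowOf d0 x ys e) := by
  induction t generalizing e with
  | nil => rfl
  | cons x'' t' ih =>
    simp only [List.foldl_cons]
    rw [ih _ (fun a ha => hx a (by simp [ha]))
          (fun y hy => contains_rowOf_mono _ _ _ _ _ (hc y hy)),
      ← rowOf_comm d0 x x'' ys ys e (hx x'' (by simp)) hc]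

-- MAIN: A's reversed current-read sweep equals the forward frozen-read sweep
theorem pvMain (d0 : PySem.Dict (Int × Int) Bool) (ys : List Int) (xs : List Int)
    (e : PySem.Dict (Int × Int) Bool)
    (hs : xs.Pairwise (· < ·))
    (hc : ∀ x ∈ xs, (∃ x' ∈ xs, x < x') → ∀ y ∈ ys, e.contains (x + 1, y) = true)
    (ha : ∀ x ∈ xs, ∀ y ∈ ys, e.getD (x, y) false = d0.getD (x, y) false) :
    xs.reverse.foldl
        (fun e x => ys.foldl (fun e y => e.insert (x + 1, y) (e.getD (x, y) false)) e) e
      = xs.foldl (fun e x => rowOf d0 x ys e) e := by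
  induction xs generalizing e with
  | nil => rfl
  | cons x t ih =>
    rcases List.pairwise_cons.mp hs with ⟨hlt, hs'⟩
    have hrev : (x :: t).reverse = t.reverse ++ [x] := by simp
    rw [hrev, List.foldl_append,
      ih _ hs'
        (fun a ha' ⟨b, hb, hab⟩ => hc a (by simp [ha']) ⟨b, by simp [hb], hab⟩)
        (fun a ha' y hy => ha a (by simp [ha']) y hy)]
    simp only [List.foldl_cons, List.foldl_nil]
    have hM : ∀ y ∈ ys,
        (t.foldl (fun e x'' => rowOf d0 x'' ys e) e).getD (x, y) false = d0.getD (x, y) false := by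
      intro y hy
      rw [getD_foldl_rowOf d0 ys t e (x, y) (fun a ha' => by have := hlt a ha'; simp; omega)]
      exact ha x (by simp) y hy
    rw [rowCur_eq_rowOf d0 x ys _ hM]
    cases t with
    | nil => rfl
    | cons x'' t' =>
      exact foldl_rowOf_comm d0 ys x (x'' :: t') e
        (fun a ha' => ne_of_lt (hlt a ha'))
        (hc x (by simp) ⟨x'', by simp, hlt x'' (by simp)⟩)

-- B's max loop equals A's
theorem bounds_eq (d : PySem.Dict (Int × Int) Bool) : get_bounds d = get_max d := by
  unfold get_bounds get_max
  congr 1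
  funext acc c
  simp only [Prod.mk.injEq]
  constructor <;> (rw [max_def]; split_ifs <;> omega)


-- a dict whose keys meet the rectangle in exactly area-many points contains every cell of it
theorem pvPreDense (mapping : List (Int × Int × Bool)) (col_idx : Int)
    (hpre : Pre_add_col mapping col_idx) :
    ∀ x ∈ PySem.List.pyRange col_idx ((get_max (pyDictOfTriples mapping)).1 + 1) 1,
      ∀ y ∈ PySem.List.pyRange 0 ((get_max (pyDictOfTriples mapping)).2 + 1) 1,
        (pyDictOfTriples mapping).contains (x, y) = true := by
  intro x hx y hy
  unfold Pre_add_col at hpre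
  set d := pyDictOfTriples mapping with hd
  set mx := (get_max d).1
  set my := (get_max d).2
  set S := d.keys.filter
    (fun k => decide (col_idx ≤ k.1 ∧ k.1 ≤ mx ∧ 0 ≤ k.2 ∧ k.2 ≤ my)) with hS
  have hndk : d.keys.Nodup := by rw [hd]; exact PySem.Dict.nodup_keys_ofList _
  have hnd : S.Nodup := hndk.filter _
  have hsub : S.toFinset ⊆ Finset.Icc col_idx mx ×ˢ Finset.Icc (0 : Int) my := by
    intro k hk
    rw [List.mem_toFinset, hS, List.mem_filter] at hk
    rcases hk with ⟨_, hP⟩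
    simp only [decide_eq_true_eq] at hP
    simp [Finset.mem_product, Finset.mem_Icc]
    omega
  have hcardF : (Finset.Icc col_idx mx ×ˢ Finset.Icc (0 : Int) my).card
      = (mx + 1 - col_idx).toNat * (my + 1).toNat := by
    rw [Finset.card_product, Int.card_Icc, Int.card_Icc]
    norm_num
  have hcardS : S.toFinset.card = S.length := List.toFinset_card_of_nodup hnd
  have heq : S.toFinset = Finset.Icc col_idx mx ×ˢ Finset.Icc (0 : Int) my := by
    apply Finset.eq_of_subset_of_card_le hsub
    rw [hcardF, hcardS, ← hpre]
  rcases PySem.List.mem_pyRange_one.mp hx with ⟨hx1, hx2⟩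
  rcases PySem.List.mem_pyRange_one.mp hy with ⟨hy1, hy2⟩
  have hmem : (x, y) ∈ S.toFinset := by
    rw [heq]
    simp [Finset.mem_product, Finset.mem_Icc]
    omega
  rw [List.mem_toFinset, hS, List.mem_filter] at hmem
  exact (PySem.Dict.contains_iff_mem_keys _ _).mpr hmem.1

-- ===== VERDICT (by name: the statement is the Claim_ definition above) =====
theorem add_col_spec : Claim_equal_add_col := by
  intro mapping col_idx _ hpre
  unfold Spec_add_col
  simp only [add_col, add_col_alt, snapshotRegion, bounds_eq]
  congr 2
  rw [List.foldl_flatMap]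
  simp only [List.foldl_map]
  refine Eq.symm (pvMain (pyDictOfTriples mapping)
    (PySem.List.pyRange 0 ((get_max (pyDictOfTriples mapping)).2 + 1) 1)
    (PySem.List.pyRange col_idx ((get_max (pyDictOfTriples mapping)).1 + 1) 1)
    (pyDictOfTriples mapping)
    (PySem.List.pairwise_lt_pyRange_one _ _)
    ?_ (fun _ _ _ _ => rfl)).symm
  rintro x hx ⟨x', hx', hlt⟩ y hy
  rcases PySem.List.mem_pyRange_one.mp hx with ⟨h1, _⟩
  rcases PySem.List.mem_pyRange_one.mp hx' with ⟨_, h2⟩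
  exact pvPreDense mapping col_idx hpre (x + 1)
    (PySem.List.mem_pyRange_one.mpr ⟨by omega, by omega⟩) y hy
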